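-- pv_equiv track=rewrite | github.com/sinistersnare/index-selection | isel.py | get_search_usages
-- ===== SOURCE A (Python) =====
-- from typing import FrozenSet, Tuple, Iterator, Dict, Set, Optional, List, Union
-- from collections import defaultdict
--
-- class Search:
--     """
--     A search is a single search in a clause's body, with grounded variables positions.
--     so in the body if we see S0(x), then the clause will have
--     R(x, y) :- S0(x,y,1) S1(y,y,_)
--     `name = S0` and `parameters = ['x', 'y', '1']`, total = 3
--     `name = S1` and `parameters = ['y', '_']`, total = 3
--     Parameters is not a set because we dont have the positions yet,
--     So after we figure out what is joined, we can then use sets, as we will be dealing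
--     with 0-indexed positions, not values that can appear anywhere.
--     """
--
--     def __init__(self, name: str, parameters: Set[str], total: int):
--         self.name = name
--         self.parameters = parameters
--         self.total = total
--
--     def __str__(self):
--         return f"Search<name:{self.name},parameters:{self.parameters},total:{self.total}>"
--     __repr__ = __str__
--
-- def form_search(raw_search: str) -> Search:
--     """
--     Takes something like "S0(x,y)", returns a Search object: Search('S0'. {'x','y'})
--     """
--     name_end = raw_search.find('(')
--     name = raw_search[:name_end]
--
--     raw_params = raw_search[name_end+1:-1] # take out the parens.
--     params = [rp.strip() for rp in raw_params.split(',')]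
--
--     return Search(name, params, len(params))
--
-- def form_searches(line: str) -> Iterator[Search]:
--     """
--     Takes a Horn Clause and extracts relevant info.
--     """
--     body = line.split(":-")[1].strip()
--
--     return [form_search(s) for s in body.split()]
--
-- def get_usages_in_line(searches: List[Search]) -> Dict[str, List[Tuple[Tuple[int, ...], int]]]:
--     """
--     Takes a single line of searches, and constructs, for each search, which variables are used (by position 0-indexed).
--     If the variable is used in a join with another column, then
--
--     Returns a dict from a searches name to a a usage-structure:
--     The first element of the tuple is the usages themselves, by 0-index.
--     The second element is the number of columns in the search (not number used). This is a bit repetitive, as we only need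
--         One length per name, but we can normalize it later.
--     """
--     usages = defaultdict(list)
--     for search in searches:
--         # Dont need to worry about searches that are only unused params.
--         if search.parameters == {'_'}:
--             continue
--
--         uses = set()
--         amt = search.total
--         for i, param in enumerate(search.parameters):
--             if param == '_':
--                 continue
--             if param.isdigit():
--                 uses.add(i)
--                 continue
--             # need to see if the param is being used in a join! Expensive!
--             for other_search in searches:
--                 if param in other_search.parameters:
--                     uses.add(i)
--                     break
--         usages[search.name].append((tuple(uses), amt))
--     return usages
--
-- def get_search_usages(program: str) -> Dict[str, Tuple[Set[Tuple[int, ...]], int]]: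
--     """
--     Doesnt work the way we want it to, switch to using `get_usages_in_line`!
--     """
--     usages_per_line = [get_usages_in_line(form_searches(c)) for c in program.split('\n')]
--     total_usages = {}
--     # Normalize so we only have 1 amt for each rel,
--     # And also add all the usages for each line together.
--     for line in usages_per_line:
--         for rel, uses in line.items():
--             if not total_usages.get(rel):
--                 total_usages[rel] = ({t[0] for t in uses}, uses[0][1])
--             else:
--                 total_usages[rel][0].update({t[0] for t in uses})
--     return total_usages
-- ===== SOURCE B (Python) =====
-- def get_search_usages(program):
--     total_usages = {}
--     for line in program.split('\n'):
--         body = line.split(":-")[1].strip()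
--         for raw in body.split():
--             name_end = raw.find('(')
--             name = raw[:name_end]
--             params = [p.strip() for p in raw[name_end+1:-1].split(',')]
--             uses = tuple(i for i, p in enumerate(params) if p != '_')
--             entry = total_usages.get(name)
--             if entry is None:
--                 total_usages[name] = ({uses}, len(params))
--             else:
--                 entry[0].add(uses)
--     return total_usages
-- ===== Notes on version B (the rewrite author's own statement) =====
-- stated objective: faster
-- what changed: B builds the result dict in one flat pass over the parsed atoms, adding every non-'_' parameter position directly (the join scan always succeeds because the atom itself is in the line, and digit parameters are a special case of that), eliminating A's per-line defaultdict grouping, the separate merge phase, and the nested O(searches^2*params^2) join scan per line.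
import Mathlib
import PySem

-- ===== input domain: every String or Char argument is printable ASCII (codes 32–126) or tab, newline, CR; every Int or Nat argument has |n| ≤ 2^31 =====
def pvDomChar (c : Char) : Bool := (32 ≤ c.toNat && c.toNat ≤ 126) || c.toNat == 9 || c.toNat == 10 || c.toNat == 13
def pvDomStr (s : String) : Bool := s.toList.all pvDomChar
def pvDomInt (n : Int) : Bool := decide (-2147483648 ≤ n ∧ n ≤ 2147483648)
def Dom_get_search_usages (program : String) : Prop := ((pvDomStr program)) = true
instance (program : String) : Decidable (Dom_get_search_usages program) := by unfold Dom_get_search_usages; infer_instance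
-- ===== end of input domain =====

-- B replaces A's per-line defaultdict grouping + merge phase and the nested join scan by one flat
-- pass that adds every non-'_' position directly (the join scan always succeeds on the atom itself);
-- equivalence of the RETURN value is proved on Pre_ below.

-- ===== PORT A =====

-- form_search: "S0(x,y)" ↦ (name, parameters, total)
def pvFormSearch (raw : String) : String × List String × Int :=
  let nameEnd := PySem.Str.find raw "("
  let name := PySem.Str.slice raw none (some nameEnd)
  let rawParams := PySem.Str.slice raw (some (nameEnd + 1)) (some (-1))
  let params := ((PySem.Str.split? rawParams ",").getD []).map PySem.Str.strip  -- sep "," ≠ "" so split? is some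
  (name, params, (params.length : Int))

-- form_searches: line.split(":-")[1] raises IndexError when ":-" is absent; Pre_ excludes that,
-- so the `.getD ""` default is never reached on admitted inputs.
def pvFormSearches (line : String) : List (String × List String × Int) :=
  let body := PySem.Str.strip ((PySem.List.pyGet? ((PySem.Str.split? line ":-").getD []) 1).getD "")
  (PySem.Str.split₀ body).map pvFormSearch

-- the `uses` set of get_usages_in_line; the inner `for other_search in searches: … break`
-- is `any` (its only effect is a single add)
def pvUsesA (searches : List (String × List String × Int)) (params : List String) : PySem.Set Int :=
  (PySem.List.enumerate params 0).foldl
    (fun uses ip =>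
      if ip.2 == "_" then uses
      else if PySem.Str.strIsdigit ip.2 then PySem.Set.add uses ip.1
      else if searches.any (fun o => o.2.1.contains ip.2) then PySem.Set.add uses ip.1
      else uses)
    PySem.Set.empty

-- get_usages_in_line; Python's `if search.parameters == {'_'}: continue` compares a list with a
-- set, which is always False in Python — a no-op, kept as a comment only.
def pvGetUsagesInLine (searches : List (String × List String × Int)) :
    PySem.Dict String (List (List Int × Int)) :=
  searches.foldl
    (fun usages s => usages.modify s.1 [] (· ++ [((pvUsesA searches s.2.1 : List Int), s.2.2)]))
    PySem.Dict.empty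

-- body of the merge loop of get_search_usages (`if not total_usages.get(rel)`: stored tuples are
-- always truthy, so the test is exactly `get? = none`); uses[0][1] is total via pyGet? (the per-rel
-- list is never empty, so the default is never reached)
def pvMergeStep (tot : PySem.Dict String (List (List Int) × Int))
    (p : String × List (List Int × Int)) : PySem.Dict String (List (List Int) × Int) :=
  match tot.get? p.1 with
  | none => tot.insert p.1 (PySem.Set.ofList (p.2.map (·.1)), ((PySem.List.pyGet? p.2 0).getD ([], 0)).2)
  | some v => tot.insert p.1 (PySem.Set.update v.1 (p.2.map (·.1)), v.2)

def get_search_usages (program : String) : List (String × List (List Int) × Int) :=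
  let usagesPerLine := (((PySem.Str.split? program "\n").getD []).map
    (fun c => pvGetUsagesInLine (pvFormSearches c)))
  let totalUsages := usagesPerLine.foldl (fun tot line => line.items.foldl pvMergeStep tot)
    PySem.Dict.empty
  totalUsages.items

-- ===== PORT B =====

def get_search_usages_alt (program : String) : List (String × List (List Int) × Int) :=
  (((PySem.Str.split? program "\n").getD []).foldl
    (fun tot line =>
      let body := PySem.Str.strip ((PySem.List.pyGet? ((PySem.Str.split? line ":-").getD []) 1).getD "")
      (PySem.Str.split₀ body).foldl
        (fun tot raw =>
          let nameEnd := PySem.Str.find raw "("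
          let name := PySem.Str.slice raw none (some nameEnd)
          let params := ((PySem.Str.split? (PySem.Str.slice raw (some (nameEnd + 1)) (some (-1))) ",").getD []).map PySem.Str.strip
          let uses : List Int := ((PySem.List.enumerate params 0).filter (fun ip => ip.2 != "_")).map (·.1)
          match tot.get? name with
          | none => tot.insert name ([uses], (params.length : Int))
          | some v => tot.insert name (PySem.Set.add v.1 uses, v.2))
        tot)
    PySem.Dict.empty).items

-- ===== PRECONDITION & SPEC =====
-- Pre_ excludes (a) lines without ":-", on which A raises IndexError, and (b) programs where some
-- search has more than 8 parameters, on which A still returns but the order inside tuple(uses) is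
-- an accidental artefact of CPython's set hash-table iteration that no port can reproduce.
def Pre_get_search_usages (program : String) : Prop :=
  ∀ line ∈ (PySem.Str.split? program "\n").getD [],
    2 ≤ ((PySem.Str.split? line ":-").getD []).length ∧
    ∀ raw ∈ PySem.Str.split₀ (PySem.Str.strip ((PySem.List.pyGet? ((PySem.Str.split? line ":-").getD []) 1).getD "")),
      ((PySem.Str.split? (PySem.Str.slice raw (some (PySem.Str.find raw "(" + 1)) (some (-1))) ",").getD []).length ≤ 8
instance (program : String) : Decidable (Pre_get_search_usages program) := by
  unfold Pre_get_search_usages; infer_instance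

def pvWitness_get_search_usages : String := "a(x,y) :- b(y,1,_) c(x)"

def Spec_get_search_usages (program : String) (out : List (String × List (List Int) × Int)) : Prop :=
  out = get_search_usages_alt program
instance (program : String) (out : List (String × List (List Int) × Int)) :
    Decidable (Spec_get_search_usages program out) := by unfold Spec_get_search_usages; infer_instance

-- ===== CLAIM (what is proved, stated in full; the proofs are below) =====
def Claim_equal_get_search_usages : Prop :=
  ∀ (program : String), Dom_get_search_usages program → Pre_get_search_usages program →
    Spec_get_search_usages program (get_search_usages program)

-- ===== LEMMAS AND PROOFS =====

-- one flat step of B: the accumulator update for a single parsed entry (name, uses, total)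
def pvStep (tot : PySem.Dict String (List (List Int) × Int)) (e : String × List Int × Int) :
    PySem.Dict String (List (List Int) × Int) :=
  match tot.get? e.1 with
  | none => tot.insert e.1 ([e.2.1], e.2.2)
  | some v => tot.insert e.1 (PySem.Set.add v.1 e.2.1, v.2)

-- the entry A effectively produces for one search of a line
def pvEntryA (searches : List (String × List String × Int)) (s : String × List String × Int) :
    String × List Int × Int :=
  (s.1, (pvUsesA searches s.2.1 : List Int), s.2.2)

-- the items list of A's per-line dict, written as an explicit grouped list
def pvGroup (es : List (String × List Int × Int)) : List (String × List (List Int × Int)) :=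
  (PySem.Set.ofList (es.map (·.1))).map (fun k => (k, (es.filter (·.1 == k)).map (·.2)))

theorem pvUses_fold_eq (l : List (Int × String)) (c : Int × String → Bool)
    (acc : List Int) (hnd : l.Pairwise (fun a b => a.1 ≠ b.1))
    (hacc : ∀ x ∈ acc, ∀ ip ∈ l, x ≠ ip.1) :
    l.foldl (fun u ip => if c ip then PySem.Set.add u ip.1 else u) acc
      = acc ++ (l.filter c).map (·.1) := by
  induction l generalizing acc with
  | nil => simp
  | cons ip l ih =>
    rcases List.pairwise_cons.mp hnd with ⟨hip, hl⟩
    by_cases hc : c ip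
    · have hnot : ip.1 ∉ acc := fun hx => hacc _ hx ip (by simp) rfl
      have hadd : PySem.Set.add acc ip.1 = acc ++ [ip.1] := PySem.Set.add_of_not_mem hnot
      simp only [List.foldl_cons, hc, if_pos, hadd]
      rw [ih (acc ++ [ip.1]) hl ?_]
      · simp [hc]
      · intro x hx jp hjp
        rcases List.mem_append.mp hx with h | h
        · exact hacc _ h jp (by simp [hjp])
        · simp only [List.mem_singleton] at h; subst h; exact hip jp hjp
    · simp only [List.foldl_cons, hc, if_neg, Bool.false_eq_true, not_false_iff]
      rw [ih acc hl (fun x hx jp hjp => hacc _ hx jp (by simp [hjp]))]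
      simp [hc]

theorem pvUsesA_eq (searches : List (String × List String × Int))
    (s : String × List String × Int) (hs : s ∈ searches) :
    (pvUsesA searches s.2.1 : List Int)
      = ((PySem.List.enumerate s.2.1 0).filter (fun ip => ip.2 != "_")).map (·.1) := by
  unfold pvUsesA
  rw [PySem.List.foldl_congr_mem _ _
      (fun u ip => if (ip.2 != "_") then PySem.Set.add u ip.1 else u) _ ?_]
  · rw [pvUses_fold_eq _ _ _ ((PySem.List.pairwise_lt_enumerate _ _).imp (fun h => ne_of_lt h))
      (by intro x hx; simp [PySem.Set.empty] at hx)]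
    simp
  · intro acc ip hip
    by_cases h_ : ip.2 = "_"
    · simp [h_]
    · have hmem : ip.2 ∈ s.2.1 := by
        have h1 : ip.2 ∈ (PySem.List.enumerate s.2.1 0).map (·.2) := List.mem_map_of_mem hip
        simpa [PySem.List.map_snd_enumerate] using h1
      have hany : searches.any (fun o => o.2.1.contains ip.2) = true :=
        List.any_eq_true.mpr ⟨s, hs, by simpa using hmem⟩
      have h1 : (ip.2 == "_") = false := by simpa using h_
      have h2 : (ip.2 != "_") = true := by simpa using h_
      simp only [h1, h2, hany, Bool.false_eq_true, if_false, if_true]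
      by_cases hd : PySem.Str.strIsdigit ip.2 <;> simp [hd]

theorem pvItems_group (es : List (String × List Int × Int)) :
    (es.foldl (fun d e => d.modify e.1 [] (· ++ [e.2])) PySem.Dict.empty).items = pvGroup es := by
  have hkeys : (es.foldl (fun d e => d.modify e.1 [] (· ++ [e.2])) PySem.Dict.empty).keys
      = PySem.Set.ofList (es.map (·.1)) := by
    have := PySem.Dict.keys_foldl_modify_key es (·.1) [] (fun _ e l => l ++ [e.2]) PySem.Dict.empty
    simpa [PySem.Dict.keys_empty, PySem.Set.update_nil_left] using this
  have hnd : (es.foldl (fun d e => d.modify e.1 [] (· ++ [e.2])) PySem.Dict.empty).keys.Nodup :=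
    PySem.Dict.nodup_keys_foldl_modify_key es (·.1) [] (fun _ e l => l ++ [e.2])
      PySem.Dict.empty (by simp [PySem.Dict.keys_empty])
  rw [PySem.Dict.items_eq_map_keys _ hnd [], hkeys]
  unfold pvGroup
  refine List.map_congr_left (fun k hk => ?_)
  rw [PySem.Dict.getD_foldl_modify_append es PySem.Dict.empty k]
  simp

theorem pvGetUsagesInLine_items (searches : List (String × List String × Int)) :
    (pvGetUsagesInLine searches).items = pvGroup (searches.map (pvEntryA searches)) := by
  rw [← pvItems_group]
  unfold pvGetUsagesInLine
  rw [List.foldl_map]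
  rfl

theorem pvStep_nodup (tot : PySem.Dict String (List (List Int) × Int))
    (e : String × List Int × Int) (h : tot.keys.Nodup) : (pvStep tot e).keys.Nodup := by
  unfold pvStep; cases tot.get? e.1 <;> exact PySem.Dict.nodup_keys_insert _ _ _ h

theorem pvMergeStep_contains (tot : PySem.Dict String (List (List Int) × Int))
    (p : String × List (List Int × Int)) (k : String) (h : tot.contains k = true) :
    (pvMergeStep tot p).contains k = true := by
  unfold pvMergeStep; cases tot.get? p.1 <;> simp [PySem.Dict.contains_insert, h]

theorem pvMergeStep_contains_self (tot : PySem.Dict String (List (List Int) × Int))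
    (p : String × List (List Int × Int)) : (pvMergeStep tot p).contains p.1 = true := by
  unfold pvMergeStep; cases tot.get? p.1 <;> simp [PySem.Dict.contains_insert]

-- two inserts at distinct keys commute when the second key is already present
theorem pvInsert_comm (d : PySem.Dict String (List (List Int) × Int)) (k k' : String)
    (v v' : List (List Int) × Int) (hne : k' ≠ k) (hk : d.contains k = true) :
    (d.insert k' v').insert k v = (d.insert k v).insert k' v' := by
  apply PySem.Dict.ext
  by_cases hk' : d.contains k' = true
  · rw [PySem.Dict.items_insert_of_contains _ v (by simp [PySem.Dict.contains_insert, hk]),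
        PySem.Dict.items_insert_of_contains _ v' hk',
        PySem.Dict.items_insert_of_contains _ v' (by simp [PySem.Dict.contains_insert, hk']),
        PySem.Dict.items_insert_of_contains _ v hk]
    simp only [List.map_map]
    refine List.map_congr_left (fun p _ => ?_)
    simp only [Function.comp]
    rcases eq_or_ne p.1 k' with h1 | h1
    · rcases eq_or_ne p.1 k with h2 | h2
      · exact absurd (h1.symm.trans h2) hne
      · simp [h1, h2, hne, Ne.symm hne, beq_iff_eq]
    · rcases eq_or_ne p.1 k with h2 | h2
      · simp [h1, h2, hne, Ne.symm hne, beq_iff_eq]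
      · simp [h1, h2, hne, Ne.symm hne, beq_iff_eq]
  · have hk'f : d.contains k' = false := by simpa using hk'
    rw [PySem.Dict.items_insert_of_contains _ v (by simp [PySem.Dict.contains_insert, hk]),
        PySem.Dict.items_insert_of_not_contains _ v' hk'f,
        PySem.Dict.items_insert_of_not_contains _ v'
          (by simp [PySem.Dict.contains_insert, hk'f, beq_iff_eq, hne]),
        PySem.Dict.items_insert_of_contains _ v hk]
    rw [List.map_append]
    simp [beq_iff_eq, Ne.symm hne, hne]

-- pvStep at a present key commutes with pvMergeStep at a different key
theorem pvStep_mergeStep_comm (tot : PySem.Dict String (List (List Int) × Int))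
    (p : String × List (List Int × Int)) (e : String × List Int × Int)
    (hne : p.1 ≠ e.1) (hk : tot.contains e.1 = true) :
    pvStep (pvMergeStep tot p) e = pvMergeStep (pvStep tot e) p := by
  obtain ⟨v, hv⟩ : ∃ v, tot.get? e.1 = some v := by
    rw [PySem.Dict.contains_eq_isSome_get?] at hk; exact Option.isSome_iff_exists.mp hk
  unfold pvStep pvMergeStep
  cases hp : tot.get? p.1 <;>
  · simp only [hp, PySem.Dict.get?_insert_of_ne _ _ hne, PySem.Dict.get?_insert_of_ne _ _ (Ne.symm hne),
      hv]
    exact pvInsert_comm _ _ _ _ _ hne hk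

theorem pvStep_fold_comm (ps : List (String × List (List Int × Int)))
    (tot : PySem.Dict String (List (List Int) × Int)) (e : String × List Int × Int)
    (hne : ∀ p ∈ ps, p.1 ≠ e.1) (hk : tot.contains e.1 = true) :
    pvStep (ps.foldl pvMergeStep tot) e = ps.foldl pvMergeStep (pvStep tot e) := by
  induction ps generalizing tot with
  | nil => rfl
  | cons p ps ih =>
    simp only [List.foldl_cons]
    rw [ih _ (fun q hq => hne q (by simp [hq])) (pvMergeStep_contains _ _ _ hk),
        pvStep_mergeStep_comm _ _ _ (hne p (by simp)) hk]

-- merging a singleton group is one flat step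
theorem pvMergeStep_single (tot : PySem.Dict String (List (List Int) × Int))
    (e : String × List Int × Int) : pvMergeStep tot (e.1, [e.2]) = pvStep tot e := by
  unfold pvMergeStep pvStep
  cases tot.get? e.1 with
  | none =>
      simp [PySem.List.pyGet?, PySem.List.pyIdx?, PySem.Set.ofList, PySem.Set.add, PySem.Set.empty]
  | some v =>
      simp [PySem.Set.update_cons, PySem.Set.update_nil]

-- merging a group extended by one entry = merging the group, then one flat step
theorem pvMergeStep_snoc (tot : PySem.Dict String (List (List Int) × Int))
    (k : String) (l : List (List Int × Int)) (t : List Int × Int) (hl : l ≠ []) :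
    pvMergeStep tot (k, l ++ [t]) = pvStep (pvMergeStep tot (k, l)) (k, t.1, t.2) := by
  obtain ⟨x, l', rfl⟩ := List.exists_cons_of_ne_nil hl
  unfold pvMergeStep pvStep
  cases tot.get? k with
  | none =>
      simp only [PySem.Dict.get?_insert_self, PySem.Dict.insert_insert_self]
      rw [show (x :: l' ++ [t]).map (fun p => p.1) = ((x :: l').map (fun p => p.1)) ++ [t.1] by simp,
          PySem.Set.ofList_append_singleton]
      have h0 : (0 : Int) ≤ (l'.length : Int) + 1 := by omega
      simp [PySem.List.pyGet?, PySem.List.pyIdx?, h0]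
  | some v =>
      simp only [PySem.Dict.get?_insert_self, PySem.Dict.insert_insert_self]
      rw [show (x :: l' ++ [t]).map (fun p => p.1) = ((x :: l').map (fun p => p.1)) ++ [t.1] by simp,
          PySem.Set.update_append]
      simp [PySem.Set.update_cons, PySem.Set.update_nil]

-- the key lemma: folding A's merge step over the grouped per-line items equals folding B's flat
-- step over the line's entries
theorem pvGroup_fold (es : List (String × List Int × Int))
    (tot : PySem.Dict String (List (List Int) × Int)) (hnd : tot.keys.Nodup) :
    (pvGroup es).foldl pvMergeStep tot = es.foldl pvStep tot := by
  induction es using List.reverseRecOn generalizing tot with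
  | nil => simp [pvGroup, PySem.Set.ofList]
  | append_singleton es e ih =>
    by_cases hmem : e.1 ∈ es.map (·.1)
    · -- e's key already occurs: its group gains one element in place
      have hofl : PySem.Set.ofList ((es ++ [e]).map (·.1)) = PySem.Set.ofList (es.map (·.1)) := by
        rw [List.map_append, List.map_singleton, PySem.Set.ofList_append_singleton]
        exact PySem.Set.add_of_mem (by simpa [PySem.Set.mem_ofList] using hmem)
      have main : ∀ (ks : List String) (tot : PySem.Dict String (List (List Int) × Int)),
          ks.Nodup → e.1 ∈ ks → (∀ k ∈ ks, (es.filter (·.1 == k)) ≠ []) →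
          (ks.map (fun k => (k, ((es ++ [e]).filter (·.1 == k)).map (·.2)))).foldl pvMergeStep tot
            = pvStep ((ks.map (fun k => (k, (es.filter (·.1 == k)).map (·.2)))).foldl pvMergeStep tot) e := by
        intro ks
        induction ks with
        | nil => intro tot _ hin _; simp at hin
        | cons k ks ihk =>
          intro tot hksnd hin hne
          rcases List.nodup_cons.mp hksnd with ⟨hknotin, hksnd'⟩
          by_cases hk : k = e.1
          · have hfe : ((es ++ [e]).filter (·.1 == k)).map (·.2)
                = (es.filter (·.1 == k)).map (·.2) ++ [e.2] := by
              simp [List.filter_append, hk]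
            have hrest : ∀ k' ∈ ks, ((es ++ [e]).filter (·.1 == k')).map (·.2)
                = (es.filter (·.1 == k')).map (·.2) := by
              intro k' hk'
              have hne' : ¬ (e.1 = k') := fun h => hknotin (by rw [hk, h]; exact hk')
              simp [List.filter_append, hne', beq_iff_eq]
            have hlne : (es.filter (·.1 == k)).map (·.2) ≠ [] := by
              simpa using hne k (by simp)
            have hcont : (pvMergeStep tot (k, (es.filter (·.1 == k)).map (·.2))).contains e.1 = true := by
              rw [← hk]; exact pvMergeStep_contains_self _ _
            have hkeysne : ∀ p ∈ ks.map (fun k' => (k', (es.filter (·.1 == k')).map (·.2))),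
                p.1 ≠ e.1 := by
              intro p hp
              rcases List.mem_map.mp hp with ⟨k'', hk'', rfl⟩
              exact fun h => hknotin (by rw [hk, ← h]; exact hk'')
            simp only [List.map_cons, List.foldl_cons, hfe]
            rw [List.map_congr_left (fun k' hk' => by rw [hrest k' hk'] :
                ∀ k' ∈ ks, (k', ((es ++ [e]).filter (·.1 == k')).map (·.2))
                  = (k', (es.filter (·.1 == k')).map (·.2)))]
            rw [pvMergeStep_snoc _ _ _ _ hlne,
                show ((k, e.2.1, e.2.2) : String × List Int × Int) = e by rw [hk],
                ← pvStep_fold_comm _ _ _ hkeysne hcont]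
          · have hne' : ¬ (e.1 = k) := fun h => hk h.symm
            have hke : ((es ++ [e]).filter (·.1 == k)).map (·.2)
                = (es.filter (·.1 == k)).map (·.2) := by
              simp [List.filter_append, hne', beq_iff_eq]
            simp only [List.map_cons, List.foldl_cons, hke]
            exact ihk _ hksnd' ((List.mem_cons.mp hin).resolve_left (fun h => hk h.symm))
              (fun k' hk' => hne k' (List.mem_cons_of_mem _ hk'))
      have hcond : ∀ k ∈ PySem.Set.ofList (es.map (·.1)), es.filter (·.1 == k) ≠ [] := by
        intro k hk hnil
        rw [PySem.Set.mem_ofList] at hk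
        rcases List.mem_map.mp hk with ⟨s, hs, rfl⟩
        rw [List.filter_eq_nil_iff] at hnil
        exact hnil s hs (by simp)
      unfold pvGroup
      rw [hofl, main _ tot (PySem.Set.nodup_ofList _)
        (by simpa [PySem.Set.mem_ofList] using hmem) hcond,
        show (PySem.Set.ofList (es.map (·.1))).map
            (fun k => (k, (es.filter (·.1 == k)).map (·.2))) = pvGroup es from rfl,
        ih tot hnd, List.foldl_append]
      rfl
    · -- fresh key: a new singleton group is appended
      have hofl : PySem.Set.ofList ((es ++ [e]).map (·.1))
          = PySem.Set.ofList (es.map (·.1)) ++ [e.1] := by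
        rw [List.map_append, List.map_singleton, PySem.Set.ofList_append_singleton]
        exact PySem.Set.add_of_not_mem (by simpa [PySem.Set.mem_ofList] using hmem)
      have hGroups : pvGroup (es ++ [e]) = pvGroup es ++ [(e.1, [e.2])] := by
        unfold pvGroup
        rw [hofl, List.map_append]
        congr 1
        · refine List.map_congr_left (fun k hk => ?_)
          have hne' : ¬ (e.1 = k) := by
            intro h; subst h
            exact hmem (by simpa [PySem.Set.mem_ofList] using hk)
          simp [List.filter_append, hne', beq_iff_eq]
        · have hnil : es.filter (·.1 == e.1) = [] :=
            List.filter_eq_nil_iff.mpr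
              (fun x hx hb => hmem (List.mem_map.mpr ⟨x, hx, beq_iff_eq.mp hb⟩))
          simp [List.filter_append, hnil]
      rw [hGroups, List.foldl_append, List.foldl_append, ih tot hnd]
      simp [pvMergeStep_single]

-- B's parsed entry for one raw atom
def pvEntryB (raw : String) : String × List Int × Int :=
  let nameEnd := PySem.Str.find raw "("
  let name := PySem.Str.slice raw none (some nameEnd)
  let params := ((PySem.Str.split? (PySem.Str.slice raw (some (nameEnd + 1)) (some (-1))) ",").getD []).map PySem.Str.strip
  (name, ((PySem.List.enumerate params 0).filter (fun ip => ip.2 != "_")).map (·.1), (params.length : Int))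

theorem pvEntries_eq (line : String) :
    (pvFormSearches line).map (pvEntryA (pvFormSearches line))
      = (PySem.Str.split₀ (PySem.Str.strip ((PySem.List.pyGet? ((PySem.Str.split? line ":-").getD []) 1).getD ""))).map pvEntryB := by
  unfold pvFormSearches
  rw [List.map_map]
  refine List.map_congr_left (fun raw hraw => ?_)
  have hmem : pvFormSearch raw ∈ (PySem.Str.split₀ (PySem.Str.strip ((PySem.List.pyGet? ((PySem.Str.split? line ":-").getD []) 1).getD ""))).map pvFormSearch :=
    List.mem_map_of_mem hraw
  simp only [Function.comp]
  show pvEntryA _ (pvFormSearch raw) = pvEntryB raw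
  unfold pvEntryA pvEntryB
  rw [pvUsesA_eq _ _ hmem]
  rfl

theorem pvFold_nodup (es : List (String × List Int × Int))
    (tot : PySem.Dict String (List (List Int) × Int)) (h : tot.keys.Nodup) :
    (es.foldl pvStep tot).keys.Nodup := by
  induction es generalizing tot with
  | nil => exact h
  | cons e es ih => exact ih _ (pvStep_nodup _ _ h)

-- per-line body of B, named for the outer induction
def pvLineB (tot : PySem.Dict String (List (List Int) × Int)) (line : String) :
    PySem.Dict String (List (List Int) × Int) :=
  (PySem.Str.split₀ (PySem.Str.strip ((PySem.List.pyGet? ((PySem.Str.split? line ":-").getD []) 1).getD ""))).foldl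
    (fun tot raw => pvStep tot (pvEntryB raw)) tot

set_option maxHeartbeats 1000000 in
theorem pvLine_eq (line : String) (tot : PySem.Dict String (List (List Int) × Int))
    (hnd : tot.keys.Nodup) :
    (pvGetUsagesInLine (pvFormSearches line)).items.foldl pvMergeStep tot = pvLineB tot line := by
  rw [pvGetUsagesInLine_items, pvGroup_fold _ _ hnd, pvEntries_eq]
  unfold pvLineB
  rw [List.foldl_map]

theorem pvLineB_nodup (line : String) (tot : PySem.Dict String (List (List Int) × Int))
    (hnd : tot.keys.Nodup) : (pvLineB tot line).keys.Nodup := by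
  unfold pvLineB
  rw [← List.foldl_map]
  exact pvFold_nodup _ _ hnd

theorem pvFoldl_congr_inv {α β : Type} (P : β → Prop) (f g : β → α → β)
    (hfg : ∀ b a, P b → f b a = g b a) (hg : ∀ b a, P b → P (g b a)) :
    ∀ (l : List α) (b : β), P b → l.foldl f b = l.foldl g b := by
  intro l
  induction l with
  | nil => intro b _; rfl
  | cons a l ih =>
    intro b hb
    rw [List.foldl_cons, List.foldl_cons, hfg b a hb]
    exact ih _ (hg b a hb)

set_option maxHeartbeats 1000000 in
theorem pvMainFold (lines : List String) (tot : PySem.Dict String (List (List Int) × Int))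
    (hnd : tot.keys.Nodup) :
    lines.foldl (fun tot c => (pvGetUsagesInLine (pvFormSearches c)).items.foldl pvMergeStep tot) tot
      = lines.foldl pvLineB tot :=
  pvFoldl_congr_inv (fun d => d.keys.Nodup) _ _
    (fun b a hb => pvLine_eq a b hb) (fun b a hb => pvLineB_nodup a b hb) lines tot hnd

-- ===== VERDICT (by name: the statement is the Claim_ definition above) =====
set_option maxHeartbeats 1000000 in
theorem get_search_usages_spec : Claim_equal_get_search_usages := by
  intro program _ _
  show get_search_usages program = get_search_usages_alt program
  unfold get_search_usages get_search_usages_alt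
  dsimp only
  rw [List.foldl_map]
  rw [pvMainFold _ _ (by simp [PySem.Dict.keys_empty])]
  rfl
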